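-- pv_equiv track=rewrite | github.com/logston/my-pre-commit-hooks | pre_commit_hooks/jhu_check_closing_block_comments.py | get_brace_indexes
-- ===== SOURCE A (Python) =====
-- def get_brace_indexes(content, filename) -> list:
--     indexes = []
--     end_by_depth = {}
--     depth = 0
--     for i, c in enumerate(reversed(content)):
--         if c == '}':
--             end_by_depth[depth] = len(content) - i - 1
--             depth += 1
--         elif c == '{':
--             depth -= 1
--             end = end_by_depth.get(depth)
--             if end is None:
--                 raise ValueError(f'unbalanced parens near {content[i-100:i+100]} in {filename}')
--             del end_by_depth[depth]
--             indexes.append(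
--                 (
--                     len(content) - i - 1,
--                     end,
--                 )
--             )
--     return sorted(indexes)
-- ===== SOURCE B (Python) =====
-- def get_brace_indexes(content, filename) -> list:
--     pairs = []
--     stack = []  # indices of currently-unmatched '{', top = last
--     for i, c in enumerate(content):
--         if c == '{':
--             stack.append(i)
--         elif c == '}':
--             if stack:
--                 pairs.append((stack.pop(), i))
--     if stack:
--         pos = stack[-1]
--         raise ValueError(
--             f'unbalanced parens near {content[max(pos - 100, 0):pos + 100]} in {filename}'
--         )
--     return sorted(pairs)
-- ===== Notes on version B (the rewrite author's own statement) =====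
-- stated objective: idiomatic
-- what changed: A scans the reversed text keeping a dict of closing-brace positions keyed by a depth counter; B scans the text forward once with a plain stack of opening-brace indices, pairing each '}' with the popped top.
import Mathlib
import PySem

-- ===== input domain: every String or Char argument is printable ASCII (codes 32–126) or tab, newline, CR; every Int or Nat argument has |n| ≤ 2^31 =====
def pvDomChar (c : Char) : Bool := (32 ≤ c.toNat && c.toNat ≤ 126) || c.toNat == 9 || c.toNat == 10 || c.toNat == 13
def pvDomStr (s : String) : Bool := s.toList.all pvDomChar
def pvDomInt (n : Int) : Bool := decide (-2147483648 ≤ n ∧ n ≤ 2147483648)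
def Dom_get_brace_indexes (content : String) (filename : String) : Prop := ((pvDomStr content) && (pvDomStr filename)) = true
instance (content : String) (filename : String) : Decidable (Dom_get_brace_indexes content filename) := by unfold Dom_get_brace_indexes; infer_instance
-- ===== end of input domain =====

-- B replaces A's reversed scan with a depth-indexed dict by a forward scan with a plain
-- stack of open-brace indices (idiomatic bracket matching); return values agree on Pre_.

-- ===== PORT A =====
-- loop body of A: state = (indexes, end_by_depth, depth, raised); n = len(content)
def stepA (n : Int) (s : List (Int × Int) × PySem.Dict Int Int × Int × Bool)
    (ic : Int × Char) : List (Int × Int) × PySem.Dict Int Int × Int × Bool :=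
  if s.2.2.2 then s  -- after 'raise ValueError(…)' the loop does not continue
  else if ic.2 = '}' then
    (s.1, s.2.1.insert s.2.2.1 (n - ic.1 - 1), s.2.2.1 + 1, false)
  else if ic.2 = '{' then
    match s.2.1.get? (s.2.2.1 - 1) with
    | none => (s.1, s.2.1, s.2.2.1 - 1, true)  -- raise ValueError (message uses filename)
    | some e => (s.1 ++ [(n - ic.1 - 1, e)], s.2.1.erase (s.2.2.1 - 1), s.2.2.1 - 1, false)
  else s

def get_brace_indexes (content : String) (filename : String) : List (Int × Int) :=
  let cs := content.toList
  -- indexes = []; end_by_depth = {}; depth = 0; for i, c in enumerate(reversed(content)): …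
  let st := (PySem.List.enumerate cs.reverse).foldl (stepA (cs.length : Int))
    ([], PySem.Dict.empty, 0, false)
  if st.2.2.2 then [] else PySem.List.sorted2 st.1 (fun p => p.1) (fun p => p.2) false

-- ===== PORT B =====
-- loop body of B: state = (pairs, stack); stack of open indices, top = last element
def stepB (s : List (Int × Int) × List Int) (ic : Int × Char) : List (Int × Int) × List Int :=
  if ic.2 = '{' then (s.1, s.2 ++ [ic.1])
  else if ic.2 = '}' then
    match s.2.getLast? with
    | some t => (s.1 ++ [(t, ic.1)], s.2.dropLast)  -- pairs.append((stack.pop(), i))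
    | none => s
  else s

def get_brace_indexes_alt (content : String) (filename : String) : List (Int × Int) :=
  let st := (PySem.List.enumerate content.toList).foldl stepB ([], [])
  if st.2 ≠ [] then []  -- raise ValueError (message uses filename)
  else PySem.List.sorted2 st.1 (fun p => p.1) (fun p => p.2) false

-- ===== PRECONDITION & SPEC =====
-- Pre_ excludes exactly the inputs on which A raises ValueError ('unbalanced parens', i.e.
-- some '{' has no matching '}'); B raises there as well.
def Pre_get_brace_indexes (content : String) (filename : String) : Prop :=
  ∀ s ∈ content.toList.tails, s.count '{' ≤ s.count '}'
instance (content : String) (filename : String) : Decidable (Pre_get_brace_indexes content filename) := by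
  unfold Pre_get_brace_indexes; infer_instance

def pvWitness_get_brace_indexes : String × String := ("a{b{}}{}}", "f.py")

def Spec_get_brace_indexes (content : String) (filename : String) (out : List (Int × Int)) : Prop :=
  out = get_brace_indexes_alt content filename
instance (content : String) (filename : String) (out : List (Int × Int)) : Decidable (Spec_get_brace_indexes content filename out) := by
  unfold Spec_get_brace_indexes; infer_instance

-- ===== CLAIM (what is proved, stated in full; the proofs are below) =====
def Claim_equal_get_brace_indexes : Prop := ∀ (content : String) (filename : String), Dom_get_brace_indexes content filename → Pre_get_brace_indexes content filename → Spec_get_brace_indexes content filename (get_brace_indexes content filename)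

-- ===== LEMMAS AND PROOFS =====

-- reference recursions used only by the proofs
-- revScan l = pairs and leftover unmatched-'}' positions (leftmost first) of a right-to-left
-- scan of l; none = the scan hits an unmatched '{' (A raises).
def revScan : List (Int × Char) → Option (List (Int × Int) × List Int)
  | [] => some ([], [])
  | (i, c) :: l =>
    match revScan l with
    | none => none
    | some (P, ps) =>
      if c = '}' then some (P, i :: ps)
      else if c = '{' then
        match ps with
        | [] => none
        | e :: ps' => some (P ++ [(i, e)], ps')
      else some (P, ps)

-- fwdScan l S = pairs and leftover stack of a left-to-right scan of l from open-stack S (top = head)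
def fwdScan : List (Int × Char) → List Int → List (Int × Int) × List Int
  | [], S => ([], S)
  | (i, c) :: l, S =>
    if c = '{' then fwdScan l (i :: S)
    else if c = '}' then
      match S with
      | [] => fwdScan l []
      | t :: S' =>
        let r := fwdScan l S'
        ((t, i) :: r.1, r.2)
    else fwdScan l S

theorem dict_find?_filter_ne {κ ν : Type} [DecidableEq κ] (l : List (κ × ν)) (k k' : κ) :
    List.find? (fun q => q.1 == k') (List.filter (fun q => !(q.1 == k)) l)
      = if k' = k then none else List.find? (fun q => q.1 == k') l := by
  induction l with
  | nil => simp
  | cons p l ih =>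
    by_cases hpk : p.1 = k
    · rw [List.filter_cons_of_neg (by simp [hpk]), ih]
      by_cases hk : k' = k
      · simp [hk]
      · rw [if_neg hk, if_neg hk,
          List.find?_cons_of_neg (by simp [hpk]; exact fun h => hk h.symm)]
    · by_cases hpk' : p.1 = k'
      · have hk : ¬ k' = k := fun h => hpk (hpk'.trans h)
        rw [List.filter_cons_of_pos (by simp [hpk]), List.find?_cons_of_pos (by simp [hpk']),
          if_neg hk, List.find?_cons_of_pos (by simp [hpk'])]
      · rw [List.filter_cons_of_pos (by simp [hpk]), List.find?_cons_of_neg (by simp [hpk']), ih]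
        by_cases hk : k' = k
        · simp [hk]
        · rw [if_neg hk, if_neg hk, List.find?_cons_of_neg (by simp [hpk'])]

theorem dict_get?_erase {ν : Type} (d : PySem.Dict Int ν) (k k' : Int) :
    (d.erase k).get? k' = if k' = k then none else d.get? k' := by
  simp only [PySem.Dict.erase, PySem.Dict.get?, dict_find?_filter_ne]
  split <;> simp

theorem enumerate_shift {α : Type} (l : List α) (s : Int) :
    PySem.List.enumerate l (s + 1) = (PySem.List.enumerate l s).map (fun p => (p.1 + 1, p.2)) := by
  induction l generalizing s with
  | nil => simp [PySem.List.enumerate_nil]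
  | cons c t ih => simp [PySem.List.enumerate_cons, ih (s + 1), ih s]

theorem enumerate_reverse {α : Type} (l : List α) (s : Int) :
    PySem.List.enumerate l.reverse s
      = ((PySem.List.enumerate l s).map (fun p => (2 * s + (l.length : Int) - 1 - p.1, p.2))).reverse := by
  induction l generalizing s with
  | nil => simp [PySem.List.enumerate_nil]
  | cons c t ih =>
    rw [List.reverse_cons, PySem.List.enumerate_append, ih s]
    simp only [PySem.List.enumerate_cons, PySem.List.enumerate_nil, List.map_cons, List.reverse_cons]
    rw [enumerate_shift, List.map_map]
    congr 1
    · congr 1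
      · apply List.map_congr_left
        intro p _
        simp only [Function.comp, List.length_cons]
        congr 1
        push_cast
        ring
    · simp only [List.length_cons, List.length_reverse]
      congr 2
      push_cast
      ring

-- unfolding equations for the two reference scans
theorem revScan_rbrace (i : Int) (l : List (Int × Char)) (P₀ : List (Int × Int)) (ps₀ : List Int)
    (h : revScan l = some (P₀, ps₀)) : revScan ((i, '}') :: l) = some (P₀, i :: ps₀) := by
  simp [revScan, h]

theorem revScan_lbrace (i : Int) (l : List (Int × Char)) (P₀ : List (Int × Int)) (e : Int)
    (ps' : List Int) (h : revScan l = some (P₀, e :: ps')) :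
    revScan ((i, '{') :: l) = some (P₀ ++ [(i, e)], ps') := by
  simp [revScan, h]

theorem revScan_other (i : Int) (c : Char) (l : List (Int × Char)) (P₀ : List (Int × Int))
    (ps₀ : List Int) (hc1 : ¬ c = '}') (hc2 : ¬ c = '{') (h : revScan l = some (P₀, ps₀)) :
    revScan ((i, c) :: l) = some (P₀, ps₀) := by
  simp [revScan, h, hc1, hc2]

theorem fwdScan_lbrace (i : Int) (l : List (Int × Char)) (S : List Int) :
    fwdScan ((i, '{') :: l) S = fwdScan l (i :: S) := by
  simp [fwdScan]

theorem fwdScan_rbrace_nil (i : Int) (l : List (Int × Char)) :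
    fwdScan ((i, '}') :: l) [] = fwdScan l [] := by
  simp [fwdScan]

theorem fwdScan_rbrace (i : Int) (l : List (Int × Char)) (t : Int) (S' : List Int) :
    fwdScan ((i, '}') :: l) (t :: S') = ((t, i) :: (fwdScan l S').1, (fwdScan l S').2) := by
  simp [fwdScan]

theorem fwdScan_other (i : Int) (c : Char) (l : List (Int × Char)) (S : List Int)
    (hc1 : ¬ c = '{') (hc2 : ¬ c = '}') : fwdScan ((i, c) :: l) S = fwdScan l S := by
  cases S <;> simp [fwdScan, hc1, hc2]

-- a successful reverse scan exists when no suffix has more '{' than '}'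
theorem revScan_success : ∀ zl : List (Int × Char),
    (∀ zl' : List (Int × Char), zl' <:+ zl →
      zl'.countP (fun p => p.2 == '{') ≤ zl'.countP (fun p => p.2 == '}')) →
    ∃ P ps, revScan zl = some (P, ps) ∧
      ps.length + zl.countP (fun p => p.2 == '{') = zl.countP (fun p => p.2 == '}') := by
  intro zl
  induction zl with
  | nil => intro _; exact ⟨[], [], rfl, by simp⟩
  | cons p l ih =>
    obtain ⟨i, c⟩ := p
    intro h
    have hl := fun zl' (hs : zl' <:+ l) => h zl' (hs.trans (List.suffix_cons (i, c) l))
    obtain ⟨P, ps, hrev, hcnt⟩ := ih hl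
    by_cases hc1 : c = '}'
    · subst hc1
      refine ⟨P, i :: ps, revScan_rbrace i l P ps hrev, ?_⟩
      simp only [List.countP_cons, List.length_cons]
      simp only [show ((('}' : Char) == '{') = true) = False by simp, if_false,
        show ((('}' : Char) == '}') = true) = True by simp, if_true]
      omega
    · by_cases hc2 : c = '{'
      · subst hc2
        have hself := h ((i, '{') :: l) (List.suffix_refl _)
        simp only [List.countP_cons,
          show ((('{' : Char) == '{') = true) = True by simp, if_true,
          show ((('{' : Char) == '}') = true) = False by simp, if_false] at hself
        have hps : ps ≠ [] := by
          intro hnil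
          rw [hnil] at hcnt
          simp only [List.length_nil] at hcnt
          omega
        obtain ⟨e, ps', rfl⟩ : ∃ e ps', ps = e :: ps' := by
          cases ps with
          | nil => exact absurd rfl hps
          | cons e ps' => exact ⟨e, ps', rfl⟩
        refine ⟨P ++ [(i, e)], ps', revScan_lbrace i l P e ps' hrev, ?_⟩
        simp only [List.countP_cons, List.length_cons,
          show ((('{' : Char) == '{') = true) = True by simp, if_true,
          show ((('{' : Char) == '}') = true) = False by simp, if_false] at hcnt ⊢
        omega
      · refine ⟨P, ps, revScan_other i c l P ps hc1 hc2 hrev, ?_⟩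
        have e1 : (c == '{') = false := by simp [hc2]
        have e2 : (c == '}') = false := by simp [hc1]
        simp only [List.countP_cons, e1, e2, Bool.false_eq_true, if_false]
        omega

-- the pairs of a reverse scan have strictly decreasing first components, taken from the scanned indices
theorem revScan_desc : ∀ (zl : List (Int × Char)) (P : List (Int × Int)) (ps : List Int),
    revScan zl = some (P, ps) → zl.Pairwise (fun p q => p.1 < q.1) →
    P.Pairwise (fun a b => b.1 < a.1) ∧ ∀ a ∈ P, ∃ q ∈ zl, a.1 = q.1 := by
  intro zl
  induction zl with
  | nil =>
    intro P ps h _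
    simp only [revScan, Option.some.injEq, Prod.mk.injEq] at h
    obtain ⟨h1, _⟩ := h
    subst h1
    simp
  | cons p l ih =>
    obtain ⟨i, c⟩ := p
    intro P ps h hpw
    have hpw' := (List.pairwise_cons.mp hpw).2
    have hlt := (List.pairwise_cons.mp hpw).1
    rcases hrl : revScan l with _ | ⟨P₀, ps₀⟩
    · simp [revScan, hrl] at h
    · obtain ⟨hP₀, hmem₀⟩ := ih P₀ ps₀ hrl hpw'
      by_cases hc1 : c = '}'
      · subst hc1
        rw [revScan_rbrace i l P₀ ps₀ hrl] at h
        obtain ⟨h1, _⟩ := Prod.mk.inj (Option.some.inj h)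
        subst h1
        exact ⟨hP₀, fun a ha => (hmem₀ a ha).imp fun q hq => ⟨List.mem_cons_of_mem _ hq.1, hq.2⟩⟩
      · by_cases hc2 : c = '{'
        · subst hc2
          cases ps₀ with
          | nil => simp [revScan, hrl] at h
          | cons e ps' =>
            rw [revScan_lbrace i l P₀ e ps' hrl] at h
            obtain ⟨h1, _⟩ := Prod.mk.inj (Option.some.inj h)
            subst h1
            constructor
            · rw [List.pairwise_append]
              refine ⟨hP₀, by simp, ?_⟩
              intro a ha b hb
              simp only [List.mem_singleton] at hb
              subst hb
              obtain ⟨q, hq, hqa⟩ := hmem₀ a ha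
              have := hlt q hq
              simp only [hqa]
              omega
            · intro a ha
              rcases List.mem_append.mp ha with ha | ha
              · exact (hmem₀ a ha).imp fun q hq => ⟨List.mem_cons_of_mem _ hq.1, hq.2⟩
              · simp only [List.mem_singleton] at ha
                subst ha
                exact ⟨(i, '{'), List.mem_cons_self, rfl⟩
        · rw [revScan_other i c l P₀ ps₀ hc1 hc2 hrl] at h
          obtain ⟨h1, _⟩ := Prod.mk.inj (Option.some.inj h)
          subst h1
          exact ⟨hP₀, fun a ha => (hmem₀ a ha).imp fun q hq => ⟨List.mem_cons_of_mem _ hq.1, hq.2⟩⟩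

-- forward-scan pairs = reverse-scan pairs plus the stack entries matched with the leftover closers
theorem fwd_perm : ∀ (zl : List (Int × Char)) (P : List (Int × Int)) (ps : List Int),
    revScan zl = some (P, ps) → ∀ S : List Int,
    (fwdScan zl S).1.Perm (P ++ S.zip ps) := by
  intro zl
  induction zl with
  | nil =>
    intro P ps h S
    simp only [revScan, Option.some.injEq, Prod.mk.injEq] at h
    obtain ⟨h1, h2⟩ := h
    subst h1; subst h2
    simp [fwdScan]
  | cons p l ih =>
    obtain ⟨i, c⟩ := p
    intro P ps h S
    rcases hrl : revScan l with _ | ⟨P₀, ps₀⟩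
    · simp [revScan, hrl] at h
    · by_cases hc1 : c = '}'
      · subst hc1
        rw [revScan_rbrace i l P₀ ps₀ hrl] at h
        obtain ⟨h1, h2⟩ := Prod.mk.inj (Option.some.inj h)
        subst h1; subst h2
        cases S with
        | nil =>
          rw [fwdScan_rbrace_nil]
          simpa using ih P₀ ps₀ hrl []
        | cons t S' =>
          rw [fwdScan_rbrace, List.zip_cons_cons]
          have := (ih P₀ ps₀ hrl S').cons (t, i)
          exact this.trans (List.perm_middle).symm
      · by_cases hc2 : c = '{'
        · subst hc2
          cases ps₀ with
          | nil => simp [revScan, hrl] at h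
          | cons e ps' =>
            rw [revScan_lbrace i l P₀ e ps' hrl] at h
            obtain ⟨h1, h2⟩ := Prod.mk.inj (Option.some.inj h)
            subst h1; subst h2
            rw [fwdScan_lbrace]
            have := ih P₀ (e :: ps') hrl (i :: S)
            simp only [List.zip_cons_cons] at this
            simpa [List.append_assoc] using this
        · rw [revScan_other i c l P₀ ps₀ hc1 hc2 hrl] at h
          obtain ⟨h1, h2⟩ := Prod.mk.inj (Option.some.inj h)
          subst h1; subst h2
          rw [fwdScan_other i c l S hc2 hc1]
          exact ih P₀ ps₀ hrl S

-- the forward scan consumes exactly (number of leftover closers) stack entries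
theorem fwd_stack : ∀ (zl : List (Int × Char)) (P : List (Int × Int)) (ps : List Int),
    revScan zl = some (P, ps) → ∀ S : List Int,
    (fwdScan zl S).2 = S.drop ps.length := by
  intro zl
  induction zl with
  | nil =>
    intro P ps h S
    simp only [revScan, Option.some.injEq, Prod.mk.injEq] at h
    obtain ⟨_, h2⟩ := h
    subst h2
    simp [fwdScan]
  | cons p l ih =>
    obtain ⟨i, c⟩ := p
    intro P ps h S
    rcases hrl : revScan l with _ | ⟨P₀, ps₀⟩
    · simp [revScan, hrl] at h
    · by_cases hc1 : c = '}'
      · subst hc1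
        rw [revScan_rbrace i l P₀ ps₀ hrl] at h
        obtain ⟨_, h2⟩ := Prod.mk.inj (Option.some.inj h)
        subst h2
        cases S with
        | nil => simp [fwdScan_rbrace_nil, ih P₀ ps₀ hrl []]
        | cons t S' => simp [fwdScan_rbrace, ih P₀ ps₀ hrl S']
      · by_cases hc2 : c = '{'
        · subst hc2
          cases ps₀ with
          | nil => simp [revScan, hrl] at h
          | cons e ps' =>
            rw [revScan_lbrace i l P₀ e ps' hrl] at h
            obtain ⟨_, h2⟩ := Prod.mk.inj (Option.some.inj h)
            subst h2
            simp [fwdScan_lbrace, ih P₀ (e :: ps') hrl (i :: S)]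
        · rw [revScan_other i c l P₀ ps₀ hc1 hc2 hrl] at h
          obtain ⟨_, h2⟩ := Prod.mk.inj (Option.some.inj h)
          subst h2
          rw [fwdScan_other i c l S hc2 hc1]
          exact ih P₀ ps₀ hrl S

-- port B's loop is the forward scan (the Python stack is the reversed stack S)
theorem foldlB_eq_fwdScan : ∀ (zl : List (Int × Char)) (pairs : List (Int × Int)) (S : List Int),
    zl.foldl stepB (pairs, S.reverse) = (pairs ++ (fwdScan zl S).1, (fwdScan zl S).2.reverse) := by
  intro zl
  induction zl with
  | nil => intro pairs S; simp [fwdScan]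
  | cons p l ih =>
    obtain ⟨i, c⟩ := p
    intro pairs S
    by_cases hc1 : c = '{'
    · subst hc1
      have hstep : stepB (pairs, S.reverse) (i, '{') = (pairs, (i :: S).reverse) := by
        simp [stepB]
      rw [List.foldl_cons, hstep, ih pairs (i :: S), fwdScan_lbrace]
    · by_cases hc2 : c = '}'
      · subst hc2
        cases S with
        | nil =>
          have hstep : stepB (pairs, ([] : List Int).reverse) (i, '}')
              = (pairs, ([] : List Int).reverse) := by
            simp [stepB]
          rw [List.foldl_cons, hstep, ih pairs [], fwdScan_rbrace_nil]
        | cons t S' =>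
          have hstep : stepB (pairs, (t :: S').reverse) (i, '}') = (pairs ++ [(t, i)], S'.reverse) := by
            simp only [stepB, List.reverse_cons]
            rw [List.getLast?_concat, List.dropLast_concat]
            simp
          rw [List.foldl_cons, hstep, ih (pairs ++ [(t, i)]) S', fwdScan_rbrace]
          simp
      · have hstep : stepB (pairs, S.reverse) (i, c) = (pairs, S.reverse) := by
          simp [stepB, hc1, hc2]
        rw [List.foldl_cons, hstep, ih pairs S, fwdScan_other i c l S hc1 hc2]
-- A-side: the loop body with the original index restored
def stepA' (p : Int × Char) (s : List (Int × Int) × PySem.Dict Int Int × Int × Bool) :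
    List (Int × Int) × PySem.Dict Int Int × Int × Bool :=
  if s.2.2.2 then s
  else if p.2 = '}' then (s.1, s.2.1.insert s.2.2.1 p.1, s.2.2.1 + 1, false)
  else if p.2 = '{' then
    match s.2.1.get? (s.2.2.1 - 1) with
    | none => (s.1, s.2.1, s.2.2.1 - 1, true)
    | some e => (s.1 ++ [(p.1, e)], s.2.1.erase (s.2.2.1 - 1), s.2.2.1 - 1, false)
  else s

theorem stepA_idx (n j : Int) (c : Char) (s : List (Int × Int) × PySem.Dict Int Int × Int × Bool) :
    stepA n s (n - 1 - j, c) = stepA' (j, c) s := by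
  simp only [stepA, stepA']
  rw [show n - (n - 1 - j) - 1 = j from by ring]

-- the dict keyed by depth represents the reversed leftover-closer list
def DictRep (D : PySem.Dict Int Int) (ps : List Int) : Prop :=
  (∀ m : Nat, D.get? (m : Int) = ps.reverse[m]?) ∧ (∀ k : Int, k < 0 → D.get? k = none)

theorem foldrA : ∀ (zl : List (Int × Char)) (P : List (Int × Int)) (ps : List Int),
    revScan zl = some (P, ps) →
    ∃ D : PySem.Dict Int Int,
      List.foldr stepA' ([], PySem.Dict.empty, 0, false) zl = (P, D, (ps.length : Int), false) ∧
      DictRep D ps := by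
  intro zl
  induction zl with
  | nil =>
    intro P ps h
    simp only [revScan, Option.some.injEq, Prod.mk.injEq] at h
    obtain ⟨h1, h2⟩ := h
    subst h1; subst h2
    exact ⟨PySem.Dict.empty, by simp,
      fun m => by simp [PySem.Dict.get?_empty], fun k _ => by simp [PySem.Dict.get?_empty]⟩
  | cons p l ih =>
    obtain ⟨i, c⟩ := p
    intro P ps h
    rcases hrl : revScan l with _ | ⟨P₀, ps₀⟩
    · simp [revScan, hrl] at h
    · obtain ⟨D₀, hfold, hrep, hneg⟩ := ih P₀ ps₀ hrl
      by_cases hc1 : c = '}'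
      · subst hc1
        rw [revScan_rbrace i l P₀ ps₀ hrl] at h
        obtain ⟨h1, h2⟩ := Prod.mk.inj (Option.some.inj h)
        subst h1; subst h2
        refine ⟨D₀.insert (ps₀.length : Int) i, ?_, ?_, ?_⟩
        · rw [List.foldr_cons, hfold]
          simp only [stepA']
          norm_num
        · intro m
          rw [PySem.Dict.get?_insert]
          by_cases hm : m = ps₀.length
          · subst hm
            rw [if_pos rfl, List.reverse_cons,
              show (ps₀.length : Nat) = ps₀.reverse.length by simp,
              List.getElem?_concat_length]
          · rw [if_neg (by exact_mod_cast hm), hrep m, List.reverse_cons]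
            rcases Nat.lt_or_ge m ps₀.length with hlt | hge
            · rw [List.getElem?_append_left (by simpa using hlt)]
            · have hge' : ps₀.length < m := lt_of_le_of_ne hge (Ne.symm hm)
              rw [List.getElem?_eq_none (by simp; omega),
                List.getElem?_eq_none (by simp; omega)]
        · intro k hk
          rw [PySem.Dict.get?_insert, if_neg (by intro hcontra; omega), hneg k hk]
      · by_cases hc2 : c = '{'
        · subst hc2
          cases ps₀ with
          | nil => simp [revScan, hrl] at h
          | cons e ps' =>
            rw [revScan_lbrace i l P₀ e ps' hrl] at h
            obtain ⟨h1, h2⟩ := Prod.mk.inj (Option.some.inj h)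
            subst h1; subst h2
            have hget : D₀.get? (((e :: ps').length : Int) - 1) = some e := by
              rw [show ((e :: ps').length : Int) - 1 = ((ps'.length : Nat) : Int) by
                simp [List.length_cons]]
              rw [hrep ps'.length, List.reverse_cons]
              rw [show (ps'.length : Nat) = ps'.reverse.length by simp]
              rw [List.getElem?_concat_length]
            refine ⟨D₀.erase (((e :: ps').length : Int) - 1), ?_, ?_, ?_⟩
            · rw [List.foldr_cons, hfold]
              simp only [stepA', hget]
              norm_num
              decide
            · intro m
              rw [dict_get?_erase,
                show ((e :: ps').length : Int) - 1 = ((ps'.length : Nat) : Int) by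
                  simp [List.length_cons]]
              by_cases hm : m = ps'.length
              · subst hm
                rw [if_pos rfl, List.getElem?_eq_none (by simp)]
              · rw [if_neg (by exact_mod_cast hm), hrep m, List.reverse_cons]
                rcases Nat.lt_or_ge m ps'.length with hlt | hge
                · rw [List.getElem?_append_left (by simpa using hlt)]
                · have hge' : ps'.length < m := lt_of_le_of_ne hge (Ne.symm hm)
                  rw [List.getElem?_eq_none (by simp; omega),
                    List.getElem?_eq_none (by simp; omega)]
            · intro k hk
              rw [dict_get?_erase,
                if_neg (by
                  rw [show ((e :: ps').length : Int) - 1 = ((ps'.length : Nat) : Int) by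
                    simp [List.length_cons]]
                  intro hcontra; omega),
                hneg k hk]
        · rw [revScan_other i c l P₀ ps₀ hc1 hc2 hrl] at h
          obtain ⟨h1, h2⟩ := Prod.mk.inj (Option.some.inj h)
          subst h1; subst h2
          refine ⟨D₀, ?_, hrep, hneg⟩
          rw [List.foldr_cons, hfold]
          simp [stepA', hc1, hc2]

theorem insertBy_congr {α : Type} (f g : α → α → Bool) (x : α) (ys : List α)
    (h : ∀ y ∈ ys, f x y = g x y) : PySem.List.insertBy f x ys = PySem.List.insertBy g x ys := by
  induction ys with
  | nil => rfl
  | cons y ys ih =>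
    simp only [PySem.List.insertBy]
    rw [h y (List.mem_cons_self)]
    split
    · rfl
    · rw [ih (fun z hz => h z (List.mem_cons_of_mem _ hz))]

theorem mem_insertBy' {α : Type} (f : α → α → Bool) (x z : α) (ys : List α)
    (h : z ∈ PySem.List.insertBy f x ys) : z = x ∨ z ∈ ys := by
  induction ys with
  | nil => simpa [PySem.List.insertBy] using h
  | cons y ys ih =>
    simp only [PySem.List.insertBy] at h
    split at h
    · rcases List.mem_cons.mp h with h | h
      · exact Or.inl h
      · exact Or.inr h
    · rcases List.mem_cons.mp h with h | h
      · exact Or.inr (h ▸ List.mem_cons_self)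
      · rcases ih h with h | h
        · exact Or.inl h
        · exact Or.inr (List.mem_cons_of_mem _ h)

theorem foldl_insertBy_congr {α : Type} (f g : α → α → Bool) :
    ∀ (xs acc : List α),
    (∀ a ∈ xs, ∀ b, (b ∈ xs ∨ b ∈ acc) → f a b = g a b) →
    xs.foldl (fun acc x => PySem.List.insertBy f x acc) acc
      = xs.foldl (fun acc x => PySem.List.insertBy g x acc) acc := by
  intro xs
  induction xs with
  | nil => intro acc _; rfl
  | cons x t ih =>
    intro acc h
    simp only [List.foldl_cons]
    rw [insertBy_congr f g x acc (fun y hy => h x (List.mem_cons_self) y (Or.inr hy))]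
    apply ih
    intro a ha b hb
    apply h a (List.mem_cons_of_mem _ ha)
    rcases hb with hb | hb
    · exact Or.inl (List.mem_cons_of_mem _ hb)
    · rcases mem_insertBy' g x b acc hb with hb | hb
      · exact Or.inl (hb ▸ List.mem_cons_self)
      · exact Or.inr hb

theorem sorted2_eq_sorted_fst (xs : List (Int × Int))
    (h : ∀ a ∈ xs, ∀ b ∈ xs, a.1 = b.1 → a = b) :
    PySem.List.sorted2 xs (fun p => p.1) (fun p => p.2) false
      = PySem.List.sorted xs (fun p => p.1) := by
  rw [PySem.List.sorted_eq_foldl_insertBy]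
  show List.foldl _ [] xs = _
  apply foldl_insertBy_congr
  intro a ha b hb
  have hb' : b ∈ xs := by rcases hb with hb | hb; exact hb; simp at hb
  rcases lt_trichotomy a.1 b.1 with hl | he | hg
  · simp [hl, not_lt.mpr (le_of_lt hl)]
  · have : a = b := h a ha b hb' he
    subst this
    simp
  · simp [hg, not_lt.mpr (le_of_lt hg), asymm hg]

-- ===== VERDICT (by name: the statement is the Claim_ definition above) =====
theorem get_brace_indexes_spec : Claim_equal_get_brace_indexes := by
  intro content filename _ hpre
  simp only [Spec_get_brace_indexes, get_brace_indexes, get_brace_indexes_alt]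
  set cs := content.toList with hcs
  set zl := PySem.List.enumerate cs with hzl
  -- Pre_ gives a successful reverse scan
  have hcond : ∀ zl' : List (Int × Char), zl' <:+ zl →
      zl'.countP (fun p => p.2 == '{') ≤ zl'.countP (fun p => p.2 == '}') := by
    intro zl' hsuf
    have hsnd : zl'.map (fun p => p.2) <:+ cs := by
      have := hsuf.map (fun p : Int × Char => p.2)
      rwa [hzl, PySem.List.map_snd_enumerate] at this
    have := hpre (zl'.map (fun p => p.2)) ((List.mem_tails _ _).mpr hsnd)
    rwa [List.count_eq_countP, List.count_eq_countP, List.countP_map, List.countP_map] at this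
  obtain ⟨P, ps, hrev, _⟩ := revScan_success zl hcond
  -- A's fold computes (P, _, _, no-error)
  obtain ⟨D, hfoldA, _⟩ := foldrA zl P ps hrev
  have hA : (PySem.List.enumerate cs.reverse).foldl (stepA (cs.length : Int))
      ([], PySem.Dict.empty, 0, false) = (P, D, (ps.length : Int), false) := by
    rw [show PySem.List.enumerate cs.reverse = PySem.List.enumerate cs.reverse 0 from rfl]
    rw [enumerate_reverse cs 0, List.foldl_reverse, List.foldr_map]
    rw [show (fun (x : Int × Char) (y : List (Int × Int) × PySem.Dict Int Int × Int × Bool) =>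
          stepA (cs.length : Int) y (2 * 0 + (cs.length : Int) - 1 - x.1, x.2)) = stepA' from ?_]
    · exact hfoldA
    · funext x y
      rw [show 2 * 0 + (cs.length : Int) - 1 - x.1 = (cs.length : Int) - 1 - x.1 from by ring]
      exact stepA_idx (cs.length : Int) x.1 x.2 y
  -- B's fold computes the forward-scan pairs with an empty leftover stack
  have hB : zl.foldl stepB ([], []) = ((fwdScan zl []).1, []) := by
    have := foldlB_eq_fwdScan zl [] []
    simp only [List.reverse_nil, List.nil_append] at this
    rw [this, fwd_stack zl P ps hrev []]
    simp
  rw [hA, hB]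
  simp only [ne_eq, not_true_eq_false, Bool.false_eq_true, if_false]
  -- both sides sort their pair lists; the pair lists are permutations with distinct firsts
  have hperm : (fwdScan zl []).1.Perm P := by
    have := fwd_perm zl P ps hrev []
    simpa using this
  have hdesc := revScan_desc zl P ps hrev (by rw [hzl]; exact PySem.List.pairwise_lt_enumerate cs 0)
  have hPdesc : P.Pairwise (fun a b => b.1 < a.1) := hdesc.1
  have hinjP : ∀ a ∈ P, ∀ b ∈ P, a.1 = b.1 → a = b := by
    have hnd : (P.map (fun p => p.1)).Nodup := by
      rw [List.nodup_iff_pairwise_ne]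
      rw [List.pairwise_map]
      exact hPdesc.imp fun h => by omega
    intro a ha b hb hab
    exact List.inj_on_of_nodup_map hnd ha hb hab
  have hinjQ : ∀ a ∈ (fwdScan zl []).1, ∀ b ∈ (fwdScan zl []).1, a.1 = b.1 → a = b := by
    intro a ha b hb
    exact hinjP a (hperm.mem_iff.mp ha) b (hperm.mem_iff.mp hb)
  rw [sorted2_eq_sorted_fst P hinjP, sorted2_eq_sorted_fst (fwdScan zl []).1 hinjQ]
  have hrevP : P.reverse.Pairwise (fun a b => a.1 < b.1) := by
    rw [List.pairwise_reverse]
    exact hPdesc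
  rw [PySem.List.sorted_eq_of_perm_of_pairwise_lt P P.reverse (fun p => p.1) (List.reverse_perm P) hrevP]
  rw [PySem.List.sorted_eq_of_perm_of_pairwise_lt (fwdScan zl []).1 P.reverse (fun p => p.1)
    ((List.reverse_perm P).trans hperm.symm) hrevP]
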